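-- pv_equiv track=rewrite | github.com/becktepe/neps | neps/search_spaces/graph_grammar/cfg.py | unparse_tree
-- ===== SOURCE A (Python) =====
-- def unparse_tree(tree: str):
--     string = []
--     temp = ""
--     # perform single pass of tree
--     for char in tree:
--         if char == " ":
--             temp = ""
--         elif char == ")":
--             if temp[-1] != ")":
--                 string.append(temp)
--             temp += char
--         else:
--             temp += char
--     return " ".join(string)
-- ===== SOURCE B (Python) =====
-- def unparse_tree(tree: str):
--     out = []
--     for word in tree.split(" "):
--         for k in range(1, len(word)):
--             if word[k] == ")" and word[k - 1] != ")":
--                 out.append(word[:k])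
--     return " ".join(out)
-- ===== Notes on version B (the rewrite author's own statement) =====
-- stated objective: alternative
-- what changed: B first splits the tree on spaces and then, per word, scans index pairs (k-1,k) emitting the prefix word[:k] at each ')' not preceded by ')', instead of A's single forward pass with a mutable temp accumulator reset at spaces.
-- outside the precondition, e.g. on unparse_tree(')'): A raises IndexError, B returns ''
import Mathlib
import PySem

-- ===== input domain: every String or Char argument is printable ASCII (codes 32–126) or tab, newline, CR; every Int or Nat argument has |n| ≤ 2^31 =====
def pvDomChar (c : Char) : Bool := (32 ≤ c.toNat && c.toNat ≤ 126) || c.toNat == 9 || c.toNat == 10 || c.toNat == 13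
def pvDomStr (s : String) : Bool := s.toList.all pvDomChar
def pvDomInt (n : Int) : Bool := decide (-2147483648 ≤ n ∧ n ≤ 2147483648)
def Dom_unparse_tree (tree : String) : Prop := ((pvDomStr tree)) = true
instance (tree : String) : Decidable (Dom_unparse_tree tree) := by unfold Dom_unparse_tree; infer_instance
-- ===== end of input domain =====

-- B replaces A's forward accumulator pass by splitting on spaces and scanning each word's
-- index pairs (alternative decomposition, not faster); equal wherever A returns (Pre_).

-- ===== PORT A =====
-- A's for-loop over the characters, state (string, temp); Python `temp[-1]` is
-- PySem.List.pyGet? temp (-1): on empty temp Python raises IndexError (excluded by Pre_);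
-- here the `none` branch is folded into the comparison (none ≠ some ')').
def unparse_tree_loop (string : List (List Char)) (temp : List Char) :
    List Char → List (List Char)
  | [] => string
  | c :: rest =>
    if c = ' ' then unparse_tree_loop string [] rest
    else if c = ')' then
      unparse_tree_loop
        (if PySem.List.pyGet? temp (-1) ≠ some ')' then string ++ [temp] else string)
        (temp ++ [c]) rest
    else unparse_tree_loop string (temp ++ [c]) rest

def unparse_tree (tree : String) : String :=
  String.ofList (PySem.Chars.join " ".toList (unparse_tree_loop [] [] tree.toList))

-- ===== PORT B =====
def unparse_tree_alt (tree : String) : String :=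
  let words := PySem.Chars.splitOn tree.toList " ".toList
  let out := words.foldl (fun out w =>
    (PySem.List.pyRange 1 w.length 1).foldl (fun out k =>
      if PySem.List.pyGet? w k = some ')' ∧ PySem.List.pyGet? w (k - 1) ≠ some ')' then
        out ++ [PySem.List.slice w none (some k)]
      else out) out) []
  String.ofList (PySem.Chars.join " ".toList out)

-- ===== PRECONDITION & SPEC =====
-- Pre_ excludes exactly the inputs where A raises IndexError: a ')' at position 0 or right after a space.
def Pre_unparse_tree (tree : String) : Prop :=
  tree.toList.head? ≠ some ')' ∧ ¬ ([' ', ')'] <:+: tree.toList)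
instance (tree : String) : Decidable (Pre_unparse_tree tree) := by
  unfold Pre_unparse_tree; infer_instance
def pvWitness_unparse_tree : String := "(a (b c))"

def Spec_unparse_tree (tree : String) (out : String) : Prop := out = unparse_tree_alt tree
instance (tree : String) (out : String) : Decidable (Spec_unparse_tree tree out) := by
  unfold Spec_unparse_tree; infer_instance

-- ===== CLAIM (what is proved, stated in full; the proofs are below) =====
def Claim_equal_unparse_tree : Prop :=
  ∀ (tree : String), Dom_unparse_tree tree → Pre_unparse_tree tree →
    Spec_unparse_tree tree (unparse_tree tree)

-- ===== LEMMAS AND PROOFS =====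

-- splitting on a single space, directly recursive (proof-side model of Chars.splitOn)
def mySplit : List Char → List (List Char)
  | [] => [[]]
  | c :: rest =>
    if c = ' ' then [] :: mySplit rest
    else
      match mySplit rest with
      | [] => [[c]]
      | w :: ws => (c :: w) :: ws

-- tokens A collects inside one (spaceless) word, starting from accumulator t
def wtok (t : List Char) : List Char → List (List Char)
  | [] => []
  | c :: rest =>
    if c = ')' then
      (if PySem.List.pyGet? t (-1) ≠ some ')' then [t] else []) ++ wtok (t ++ [c]) rest
    else wtok (t ++ [c]) rest

-- tokens A collects over the whole string, starting from accumulator t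
def atok (t : List Char) : List Char → List (List Char)
  | [] => []
  | c :: rest =>
    if c = ' ' then atok [] rest
    else if c = ')' then
      (if PySem.List.pyGet? t (-1) ≠ some ')' then [t] else []) ++ atok (t ++ [c]) rest
    else atok (t ++ [c]) rest

-- glue a prefix onto the first word
def consFirst (t : List Char) : List (List Char) → List (List Char)
  | [] => [t]
  | w :: ws => (t ++ w) :: ws

theorem mySplit_ne_nil (cs : List Char) : mySplit cs ≠ [] := by
  cases cs with
  | nil => simp [mySplit]
  | cons c rest =>
    simp only [mySplit]
    split_ifs
    · simp
    · cases h : mySplit rest <;> simp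

theorem pyGet_neg_one (l : List Char) : PySem.List.pyGet? l (-1) = l.getLast? := by
  cases l with
  | nil => simp [PySem.List.pyGet?, PySem.List.pyIdx?]
  | cons a t => simp [PySem.List.pyGet?, PySem.List.pyIdx?, List.getLast?_eq_getElem?]

theorem aLoop_eq_atok (cs : List Char) :
    ∀ string temp, unparse_tree_loop string temp cs = string ++ atok temp cs := by
  induction cs with
  | nil => intro s t; simp [unparse_tree_loop, atok]
  | cons c rest ih =>
    intro s t
    simp only [unparse_tree_loop, atok]
    split_ifs with h1 h2 h3 <;> simp [ih]

theorem splitOn_go_spec (l : List Char) :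
    ∀ (fuel : ℕ) (cur : List Char) (acc : List (List Char)), l.length < fuel →
      PySem.Chars.splitOn.go [' '] fuel l cur acc =
        acc.reverse ++ consFirst cur.reverse (mySplit l) := by
  induction l with
  | nil =>
    intro fuel cur acc h
    cases fuel with
    | zero => omega
    | succ f => simp [PySem.Chars.splitOn.go, mySplit, consFirst]
  | cons c rest ih =>
    intro fuel cur acc h
    cases fuel with
    | zero => omega
    | succ f =>
      rw [PySem.Chars.splitOn.go]
      by_cases hc : c = ' '
      · subst hc
        simp only [List.isPrefixOf, Bool.and_true, beq_self_eq_true, if_pos]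
        simp only [List.length_cons, List.length_nil, List.drop_succ_cons, List.drop_zero]
        rw [ih f [] (cur.reverse :: acc) (by simpa using Nat.lt_of_succ_lt_succ h)]
        simp only [List.reverse_cons, mySplit, if_pos rfl, consFirst]
        cases hms : mySplit rest with
        | nil => exact absurd hms (mySplit_ne_nil rest)
        | cons w ws => simp [consFirst]
      · have hpre : [' '].isPrefixOf (c :: rest) = false := by
          simp [List.isPrefixOf]; exact fun hh => absurd hh.symm hc
        rw [if_neg (by simp [hpre])]
        rw [ih f (c :: cur) acc (by simpa using Nat.lt_of_succ_lt_succ h)]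
        simp only [mySplit, if_neg hc, List.reverse_cons]
        cases hms : mySplit rest with
        | nil => exact absurd hms (mySplit_ne_nil rest)
        | cons w ws => simp [consFirst]

theorem splitOn_eq_mySplit (cs : List Char) :
    PySem.Chars.splitOn cs [' '] = mySplit cs := by
  rw [PySem.Chars.splitOn, splitOn_go_spec cs (cs.length + 1) [] [] (by omega)]
  cases h : mySplit cs with
  | nil => exact absurd h (mySplit_ne_nil cs)
  | cons w ws => simp [consFirst]

def wtokFull (t : List Char) : List (List Char) → List (List Char)
  | [] => wtok t []
  | w :: ws => wtok t w ++ ws.flatMap (wtok [])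

theorem atok_eq_wtokFull (cs : List Char) :
    ∀ t, atok t cs = wtokFull t (mySplit cs) := by
  induction cs with
  | nil => intro t; simp [atok, mySplit, wtokFull, wtok]
  | cons c rest ih =>
    intro t
    simp only [atok, mySplit]
    by_cases hc : c = ' '
    · subst hc
      rw [if_pos rfl, if_pos rfl, ih []]
      cases hms : mySplit rest with
      | nil => exact absurd hms (mySplit_ne_nil rest)
      | cons w ws => simp [wtokFull, wtok]
    · rw [if_neg hc, if_neg hc]
      cases hms : mySplit rest with
      | nil => exact absurd hms (mySplit_ne_nil rest)
      | cons w ws =>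
        rw [ih (t ++ [c]), hms]
        by_cases hp : c = ')'
        · subst hp
          simp [wtokFull, wtok]
        · simp [wtokFull, wtok, hp]

theorem atok_eq_flatMap (cs : List Char) :
    atok [] cs = (mySplit cs).flatMap (wtok []) := by
  rw [atok_eq_wtokFull cs []]
  cases h : mySplit cs with
  | nil => exact absurd h (mySplit_ne_nil cs)
  | cons w ws => simp [wtokFull]

-- position-wise characterisation of wtok
theorem wtok_eq_filterMap (w : List Char) :
    ∀ t, wtok t w = (List.range w.length).filterMap (fun k =>
      if w[k]? = some ')' ∧ (t ++ w.take k).getLast? ≠ some ')' then some (t ++ w.take k)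
      else none) := by
  induction w with
  | nil => intro t; simp [wtok]
  | cons c rest ih =>
    intro t
    rw [List.length_cons, List.range_succ_eq_map, List.filterMap_cons]
    have htail : (List.map Nat.succ (List.range rest.length)).filterMap
        (fun k => if (c :: rest)[k]? = some ')' ∧ (t ++ (c :: rest).take k).getLast? ≠ some ')'
          then some (t ++ (c :: rest).take k) else none) =
        (List.range rest.length).filterMap
        (fun k => if rest[k]? = some ')' ∧ ((t ++ [c]) ++ rest.take k).getLast? ≠ some ')'
          then some ((t ++ [c]) ++ rest.take k) else none) := by
      rw [List.filterMap_map]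
      apply List.filterMap_congr
      intro k _
      simp only [Function.comp_apply, Nat.succ_eq_add_one, List.take_succ_cons,
        List.getElem?_cons_succ, List.append_assoc, List.singleton_append]
    simp only [wtok, pyGet_neg_one]
    by_cases hp : c = ')'
    · subst hp
      rw [htail, ih (t ++ [')'])]
      simp only [List.getElem?_cons_zero, List.take_zero, List.append_nil]
      by_cases hl : t.getLast? = some ')'
      · simp [hl]
      · simp [hl]
    · rw [if_neg hp, htail, ih (t ++ [c])]
      simp only [List.getElem?_cons_zero, List.take_zero, List.append_nil]
      rw [if_neg (by simp [hp] : ¬((some c = some ')') ∧ (t.getLast? ≠ some ')')))]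

theorem foldl_ite_append {α β : Type} (P : α → Prop) [DecidablePred P] (g : α → β)
    (l : List α) (acc : List β) :
    l.foldl (fun acc x => if P x then acc ++ [g x] else acc) acc =
      acc ++ l.filterMap (fun x => if P x then some (g x) else none) := by
  induction l generalizing acc with
  | nil => simp
  | cons a l ih =>
    rw [List.foldl_cons, ih, List.filterMap_cons]
    split_ifs <;> simp

theorem getLast?_take_succ (w : List Char) (j : ℕ) (hj : j < w.length) :
    (w.take (j + 1)).getLast? = w[j]? := by
  rw [List.getLast?_eq_getElem?, List.length_take]
  have h : min (j + 1) w.length - 1 = j := by omega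
  rw [h]
  exact List.getElem?_take_of_lt (by omega)

-- the inner loop of B on one word equals wtok [] when the word does not start with ')'
theorem bword_eq_wtok (w : List Char) (hw : w.head? ≠ some ')') :
    (PySem.List.pyRange 1 w.length 1).foldl (fun out k =>
      if PySem.List.pyGet? w k = some ')' ∧ PySem.List.pyGet? w (k - 1) ≠ some ')' then
        out ++ [PySem.List.slice w none (some k)]
      else out) [] = wtok [] w := by
  rw [wtok_eq_filterMap w [], PySem.List.pyRange_one, List.foldl_map,
    foldl_ite_append (fun j : ℕ => PySem.List.pyGet? w (1 + (j : ℤ)) = some ')' ∧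
      PySem.List.pyGet? w ((1 + (j : ℤ)) - 1) ≠ some ')')
      (fun j : ℕ => PySem.List.slice w none (some (1 + (j : ℤ))))]
  simp only [List.nil_append]
  cases hl : w.length with
  | zero =>
    have : w = [] := List.eq_nil_of_length_eq_zero hl
    subst this
    simp
  | succ n =>
    have h1 : (((n + 1 : ℕ) : ℤ) - 1).toNat = n := by omega
    rw [h1, List.range_succ_eq_map, List.filterMap_cons, List.filterMap_map]
    have h0 : (if w[0]? = some ')' ∧ (w.take 0).getLast? ≠ some ')'
        then some (w.take 0) else none) = none := by
      rw [if_neg]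
      rintro ⟨h, -⟩
      rw [← List.head?_eq_getElem?] at h
      exact hw h
    rw [h0]
    apply List.filterMap_congr
    intro j hj
    have hjn : j < n := by simpa using hj
    have hc1 : (1 : ℤ) + (j : ℤ) = ((j + 1 : ℕ) : ℤ) := by push_cast; ring
    simp only [Function.comp_apply, hc1, PySem.List.pyGet?_natCast,
      PySem.List.slice_to_natCast, Nat.succ_eq_add_one]
    have hc3 : ((j + 1 : ℕ) : ℤ) - 1 = ((j : ℕ) : ℤ) := by push_cast; ring
    rw [hc3, PySem.List.pyGet?_natCast, getLast?_take_succ w j (by omega)]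

theorem infix_cons {l : List Char} {c : Char} (h : [' ', ')'] <:+: l) :
    [' ', ')'] <:+: (c :: l) := h.trans (List.suffix_cons c l).isInfix

-- heads of the words mySplit produces, under Pre_'s no-" )" condition
theorem mySplit_heads (cs : List Char) (h2 : ¬ ([' ', ')'] <:+: cs)) :
    (∀ w ∈ (mySplit cs).tail, w.head? ≠ some ')') ∧
    (∀ x, (mySplit cs).headI.head? = some x → cs.head? = some x) := by
  induction cs with
  | nil => simp [mySplit]
  | cons c rest ih =>
    have h2r : ¬ ([' ', ')'] <:+: rest) := fun h => h2 (infix_cons h)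
    obtain ⟨iht, ihh⟩ := ih h2r
    by_cases hc : c = ' '
    · subst hc
      have hrh : rest.head? ≠ some ')' := by
        intro hh
        apply h2
        cases rest with
        | nil => simp at hh
        | cons d rs =>
          simp only [List.head?_cons, Option.some.injEq] at hh
          subst hh
          exact ⟨[], rs, by simp⟩
      constructor
      · simp only [mySplit]
        intro w hw
        cases hms : mySplit rest with
        | nil => simp [hms] at hw
        | cons v vs =>
          rw [hms] at hw
          cases hw with
          | head =>
            intro hcon
            exact hrh (ihh ')' (by rw [hms]; simpa using hcon))
          | tail _ hmem =>
            exact iht w (by rw [hms]; simpa using hmem)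
      · simp [mySplit]
    · constructor
      · simp only [mySplit, if_neg hc]
        cases hms : mySplit rest with
        | nil => simp
        | cons v vs =>
          simp only [List.tail_cons]
          intro w hw
          exact iht w (by rw [hms]; simpa using hw)
      · simp only [mySplit, if_neg hc]
        cases hms : mySplit rest with
        | nil => simp
        | cons v vs => simp

theorem mySplit_heads_all (cs : List Char) (h1 : cs.head? ≠ some ')')
    (h2 : ¬ ([' ', ')'] <:+: cs)) : ∀ w ∈ mySplit cs, w.head? ≠ some ')' := by
  obtain ⟨ht, hh⟩ := mySplit_heads cs h2
  intro w hw
  cases hms : mySplit cs with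
  | nil => rw [hms] at hw; simp at hw
  | cons v vs =>
    rw [hms] at hw
    cases hw with
    | head =>
      intro hcon
      exact h1 (hh ')' (by rw [hms]; simpa using hcon))
    | tail _ hmem => exact ht w (by rw [hms]; simpa using hmem)

-- ===== VERDICT (by name: the statement is the Claim_ definition above) =====
theorem unparse_tree_spec : Claim_equal_unparse_tree := by
  intro tree _ hpre
  obtain ⟨h1, h2⟩ := hpre
  unfold Spec_unparse_tree unparse_tree unparse_tree_alt
  have hsep : (" " : String).toList = [' '] := rfl
  apply congrArg String.ofList
  apply congrArg (PySem.Chars.join " ".toList)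
  rw [aLoop_eq_atok, List.nil_append, atok_eq_flatMap, hsep, splitOn_eq_mySplit]
  have hstep : (fun (out : List (List Char)) (w : List Char) =>
      (PySem.List.pyRange 1 w.length 1).foldl (fun out k =>
        if PySem.List.pyGet? w k = some ')' ∧ PySem.List.pyGet? w (k - 1) ≠ some ')' then
          out ++ [PySem.List.slice w none (some k)]
        else out) out) = (fun out w => out ++
      (PySem.List.pyRange 1 w.length 1).foldl (fun out k =>
        if PySem.List.pyGet? w k = some ')' ∧ PySem.List.pyGet? w (k - 1) ≠ some ')' then
          out ++ [PySem.List.slice w none (some k)]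
        else out) []) := by
    funext out w
    rw [foldl_ite_append (fun k : ℤ => PySem.List.pyGet? w k = some ')' ∧
        PySem.List.pyGet? w (k - 1) ≠ some ')')
        (fun k : ℤ => PySem.List.slice w none (some k)),
      foldl_ite_append (fun k : ℤ => PySem.List.pyGet? w k = some ')' ∧
        PySem.List.pyGet? w (k - 1) ≠ some ')')
        (fun k : ℤ => PySem.List.slice w none (some k))]
    simp
  rw [hstep, PySem.List.foldl_append_eq_flatMap, List.nil_append]
  symm
  apply List.flatMap_congr
  intro w hw
  exact bword_eq_wtok w (mySplit_heads_all tree.toList h1 h2 w hw)
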